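-- pv_equiv track=rewrite | github.com/justinminsk/Python_Files | Intro_To_Python/HW14/Linear_search.py | lin_search3
-- ===== SOURCE A (Python) =====
-- def lin_search3(list, value):
--     list.insert(0, value)  # insert the sent value
--     i = len(list) - 1  # make i at the end of the list
--     while list[i] != value:  # go through the list
--         i = i - 1
--     list.pop(0)
--     if i == 0:
--         return -1
--     return i - 1
-- ===== SOURCE B (Python) =====
-- def lin_search3(list, value):
--     result = -1
--     for i, x in enumerate(list):
--         if x == value:
--             result = i
--     return result
-- ===== Notes on version B (the rewrite author's own statement) =====
-- stated objective: idiomatic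
-- what changed: Forward enumerate scan keeping a running last-match index accumulator, instead of inserting a sentinel copy of value at the front, scanning backwards with a while loop, and popping the sentinel.
import Mathlib
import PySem

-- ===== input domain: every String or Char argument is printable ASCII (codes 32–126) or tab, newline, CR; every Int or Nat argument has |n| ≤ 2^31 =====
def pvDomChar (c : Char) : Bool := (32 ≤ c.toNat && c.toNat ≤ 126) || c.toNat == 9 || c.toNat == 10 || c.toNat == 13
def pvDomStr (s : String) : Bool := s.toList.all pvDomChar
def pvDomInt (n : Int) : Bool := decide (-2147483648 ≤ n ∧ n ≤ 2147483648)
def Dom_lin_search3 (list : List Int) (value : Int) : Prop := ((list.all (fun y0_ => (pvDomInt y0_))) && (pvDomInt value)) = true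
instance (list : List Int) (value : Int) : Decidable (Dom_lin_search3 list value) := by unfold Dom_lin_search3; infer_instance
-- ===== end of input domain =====

-- B replaces A's sentinel-insert + backward while-loop with an idiomatic forward
-- enumerate scan keeping a running last-match index; A's in-place mutation is
-- undone by A itself (insert then pop), so the list is unchanged by both.

-- ===== PORT A =====
-- A's while loop scans xs = value :: list downward from index len(list).
-- The sentinel at index 0 makes the condition xs[0] != value always false, so the
-- structural recursion below (which stops at 0) performs exactly A's loop.
def linSearch3Loop (xs : List Int) (value : Int) : Nat → Nat
  | 0 => 0
  | i + 1 => if xs.getD (i + 1) 0 ≠ value then linSearch3Loop xs value i else i + 1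

def lin_search3 (list : List Int) (value : Int) : Int :=
  let xs := value :: list          -- list.insert(0, value)
  let i := linSearch3Loop xs value (xs.length - 1)   -- while list[i] != value: i -= 1
  -- list.pop(0) restores the input list (return value unaffected)
  if i = 0 then -1 else (i : Int) - 1

-- ===== PORT B =====
def lin_search3_alt (list : List Int) (value : Int) : Int :=
  (PySem.List.enumerate list).foldl
    (fun result p => if p.2 = value then p.1 else result) (-1)

-- ===== PRECONDITION & SPEC =====
def Spec_lin_search3 (list : List Int) (value : Int) (out : Int) : Prop := out = lin_search3_alt list value
instance (list : List Int) (value : Int) (out : Int) : Decidable (Spec_lin_search3 list value out) := by unfold Spec_lin_search3; infer_instance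

-- ===== CLAIM (what is proved, stated in full; the proofs are below) =====
def Claim_equal_lin_search3 : Prop := ∀ (list : List Int) (value : Int), Dom_lin_search3 list value → Spec_lin_search3 list value (lin_search3 list value)

-- ===== LEMMAS AND PROOFS =====

-- The backward loop ignores elements beyond the current index.
theorem linSearch3Loop_append (l : List Int) (x v : Int) :
    ∀ i, i ≤ l.length → linSearch3Loop (v :: (l ++ [x])) v i = linSearch3Loop (v :: l) v i := by
  intro i
  induction i with
  | zero => intro _; rfl
  | succ i ih =>
      intro hi
      have hlt : i + 1 < (v :: l).length := by simp; omega
      have hget : (v :: (l ++ [x])).getD (i + 1) 0 = (v :: l).getD (i + 1) 0 := by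
        have : (v :: (l ++ [x])) = (v :: l) ++ [x] := by simp
        rw [this, List.getD_eq_getElem?_getD, List.getD_eq_getElem?_getD,
            List.getElem?_append_left hlt]
      simp only [linSearch3Loop, hget]
      split
      · exact ih (by omega)
      · rfl

theorem alt_append (l : List Int) (x v : Int) :
    lin_search3_alt (l ++ [x]) v =
      if x = v then (l.length : Int) else lin_search3_alt l v := by
  unfold lin_search3_alt
  rw [PySem.List.enumerate_append, List.foldl_append]
  simp [PySem.List.enumerate]

theorem lin_search3_eq_alt (l : List Int) (v : Int) :
    lin_search3 l v = lin_search3_alt l v := by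
  induction l using List.reverseRecOn with
  | nil => rfl
  | append_singleton l x ih =>
      rw [alt_append]
      unfold lin_search3
      simp only [List.length_cons, List.length_append,
        Nat.add_sub_cancel]
      have hget : (v :: (l ++ [x])).getD (l.length + 1) 0 = x := by
        have : (v :: (l ++ [x])) = (v :: l) ++ [x] := by simp
        rw [this, List.getD_eq_getElem?_getD, List.getElem?_append_right (by simp)]
        simp
      show (if linSearch3Loop (v :: (l ++ [x])) v (l.length + 1) = 0 then (-1 : Int)
            else (linSearch3Loop (v :: (l ++ [x])) v (l.length + 1) : Int) - 1) = _
      rw [show linSearch3Loop (v :: (l ++ [x])) v (l.length + 1)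
            = if (v :: (l ++ [x])).getD (l.length + 1) 0 ≠ v then
                linSearch3Loop (v :: (l ++ [x])) v l.length else l.length + 1 from rfl,
          hget]
      by_cases hx : x = v
      · simp [hx]
      · rw [if_pos hx, if_neg hx, linSearch3Loop_append l x v l.length le_rfl]
        exact ih

-- ===== VERDICT (by name: the statement is the Claim_ definition above) =====
theorem lin_search3_spec : Claim_equal_lin_search3 := by
  intro l v _
  exact lin_search3_eq_alt l v
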